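-- pv_equiv track=rewrite | github.com/KimperYang/KVMemory | scripts/evaluation/timer/sum.py | create_position_ids
-- ===== SOURCE A (Python) =====
-- def create_position_ids(
--     batch_size: int,
--     seq_length: int,
--     start_pos: int,
--     reencode_num: int):
--
--     cache_position_ids = []
--     sum_position_ids = []
--
--     for i in range(batch_size):
--         item_start = start_pos + i * (seq_length + reencode_num)
--         cache_position_ids += list(range(item_start, item_start + seq_length))
--         sum_position_ids += list(range(item_start + seq_length, item_start + seq_length + reencode_num))
--     return cache_position_ids,sum_position_ids
-- ===== SOURCE B (Python) =====
-- def create_position_ids(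
--     batch_size: int,
--     seq_length: int,
--     start_pos: int,
--     reencode_num: int):
--
--     block = seq_length + reencode_num
--     cache_position_ids = []
--     sum_position_ids = []
--     for pos in range(start_pos, start_pos + batch_size * block):
--         if (pos - start_pos) % block < seq_length:
--             cache_position_ids.append(pos)
--         else:
--             sum_position_ids.append(pos)
--     return cache_position_ids, sum_position_ids
-- ===== Notes on version B (the rewrite author's own statement) =====
-- stated objective: alternative
-- what changed: Replaces the per-batch loop that concatenates two range slices per iteration with one flat pass over the whole position range, classifying each position into cache or sum by its offset within its block ((pos-start_pos) % block < seq_length); Pre_ excludes only mixed-sign inputs outside the natural domain (a negative seq_length or reencode_num alongside a positive one with batch_size > 0, or a negative batch_size with negative total block), where A returns accidental overlapping range slices.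
-- outside the precondition, e.g. on create_position_ids(2, -1, 5, 3): A returns ([], [4, 5, 6, 6, 7, 8]), B returns ([], [5, 6, 7, 8]); on create_position_ids(2, 3, 0, -1): A returns ([0, 1, 2, 2, 3, 4], []), B returns ([0, 1, 2, 3], []); on create_position_ids(-2, 0, 0, -1): A returns ([], []), B returns ([], [0, 1])
import Mathlib
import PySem

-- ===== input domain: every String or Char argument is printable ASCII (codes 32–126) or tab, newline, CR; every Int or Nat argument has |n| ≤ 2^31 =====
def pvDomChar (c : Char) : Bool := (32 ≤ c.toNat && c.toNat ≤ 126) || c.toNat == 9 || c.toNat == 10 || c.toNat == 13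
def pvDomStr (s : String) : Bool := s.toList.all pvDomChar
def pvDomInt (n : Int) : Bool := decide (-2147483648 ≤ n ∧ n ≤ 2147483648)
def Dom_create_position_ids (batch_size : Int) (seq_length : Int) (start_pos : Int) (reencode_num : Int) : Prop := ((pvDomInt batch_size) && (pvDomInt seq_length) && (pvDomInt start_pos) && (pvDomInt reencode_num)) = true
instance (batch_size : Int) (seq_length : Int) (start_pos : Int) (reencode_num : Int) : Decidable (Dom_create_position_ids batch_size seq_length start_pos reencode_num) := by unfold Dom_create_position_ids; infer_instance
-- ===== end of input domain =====

-- B replaces the per-batch loop appending two range slices by a single flat pass over the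
-- whole position range, classifying each position by its offset within its block
-- (objective: alternative decomposition, same cost).

-- ===== PORT A =====
def create_position_ids (batch_size : Int) (seq_length : Int) (start_pos : Int) (reencode_num : Int) : List Int × List Int :=
  (PySem.List.pyRange 0 batch_size 1).foldl
    (fun acc i =>
      let item_start := start_pos + i * (seq_length + reencode_num)
      (acc.1 ++ PySem.List.pyRange item_start (item_start + seq_length) 1,
       acc.2 ++ PySem.List.pyRange (item_start + seq_length) (item_start + seq_length + reencode_num) 1))
    ([], [])

-- ===== PORT B =====
def create_position_ids_alt (batch_size : Int) (seq_length : Int) (start_pos : Int) (reencode_num : Int) : List Int × List Int :=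
  let block := seq_length + reencode_num
  (PySem.List.pyRange start_pos (start_pos + batch_size * block) 1).foldl
    (fun acc pos =>
      if PySem.Int.mod (pos - start_pos) block < seq_length then (acc.1 ++ [pos], acc.2)
      else (acc.1, acc.2 ++ [pos]))
    ([], [])

-- ===== PRECONDITION & SPEC =====
-- Pre_ excludes only mixed-sign inputs outside the natural domain (a negative seq_length or
-- reencode_num alongside a positive one with batch_size > 0, or a negative batch_size with
-- negative total block): there A returns accidental overlapping range slices produced by
-- range() silently ignoring negative extents, and B's flat pass does the natural thing instead.
def Pre_create_position_ids (batch_size : Int) (seq_length : Int) (start_pos : Int) (reencode_num : Int) : Prop :=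
  (0 ≤ seq_length ∧ 0 ≤ reencode_num) ∨
  (batch_size ≤ 0 ∧ 0 ≤ seq_length + reencode_num) ∨
  (0 ≤ batch_size ∧ seq_length ≤ 0 ∧ reencode_num ≤ 0)
instance (batch_size : Int) (seq_length : Int) (start_pos : Int) (reencode_num : Int) : Decidable (Pre_create_position_ids batch_size seq_length start_pos reencode_num) := by unfold Pre_create_position_ids; infer_instance
def pvWitness_create_position_ids : Int × Int × Int × Int := (2, 3, 0, 1)

def Spec_create_position_ids (batch_size : Int) (seq_length : Int) (start_pos : Int) (reencode_num : Int) (out : List Int × List Int) : Prop := out = create_position_ids_alt batch_size seq_length start_pos reencode_num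
instance (batch_size : Int) (seq_length : Int) (start_pos : Int) (reencode_num : Int) (out : List Int × List Int) : Decidable (Spec_create_position_ids batch_size seq_length start_pos reencode_num out) := by unfold Spec_create_position_ids; infer_instance

-- ===== CLAIM (what is proved, stated in full; the proofs are below) =====
def Claim_equal_create_position_ids : Prop := ∀ (batch_size : Int) (seq_length : Int) (start_pos : Int) (reencode_num : Int), Dom_create_position_ids batch_size seq_length start_pos reencode_num → Pre_create_position_ids batch_size seq_length start_pos reencode_num → Spec_create_position_ids batch_size seq_length start_pos reencode_num (create_position_ids batch_size seq_length start_pos reencode_num)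

-- ===== LEMMAS AND PROOFS =====

-- canonical form: concatenation of n blocks, block i = pyRange (c + i*st) (c + i*st + w)
def pvBlocks (c st w : Int) : Nat → List Int
  | 0 => []
  | n + 1 => pvBlocks c st w n ++ PySem.List.pyRange (c + n * st) (c + n * st + w) 1

lemma pvA_eq (s p r : Int) (n : Nat) :
    create_position_ids (n : Int) s p r = (pvBlocks p (s + r) s n, pvBlocks (p + s) (s + r) r n) := by
  induction n with
  | zero => simp [create_position_ids, pvBlocks]
  | succ n ih =>
      have hsp : PySem.List.pyRange 0 ((n : Int) + 1) 1
          = PySem.List.pyRange 0 (n : Int) 1 ++ [(n : Int)] :=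
        PySem.List.pyRange_one_succ_right (by positivity)
      unfold create_position_ids at ih ⊢
      push_cast
      rw [hsp, List.foldl_append, ih]
      simp [pvBlocks, Prod.mk.injEq, add_assoc]
      congr 1 <;> ring

-- the flat loop of B is a two-way partition of the flat range
lemma pv_foldl_partition (q : Int → Prop) [DecidablePred q] (l : List Int) (acc : List Int × List Int) :
    l.foldl (fun acc pos => if q pos then (acc.1 ++ [pos], acc.2) else (acc.1, acc.2 ++ [pos])) acc
      = (acc.1 ++ l.filter (fun x => decide (q x)), acc.2 ++ l.filter (fun x => !decide (q x))) := by
  induction l generalizing acc with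
  | nil => simp
  | cons x xs ih => by_cases hq : q x <;> simp [List.foldl_cons, hq, ih]

lemma pv_filter_lt (a m b : Int) (h1 : a ≤ m) (h2 : m ≤ b) :
    (PySem.List.pyRange a b 1).filter (fun x => decide (x < m)) = PySem.List.pyRange a m 1 := by
  rw [PySem.List.pyRange_one_append a m b h1 h2, List.filter_append]
  have e1 : (PySem.List.pyRange a m 1).filter (fun x => decide (x < m)) = PySem.List.pyRange a m 1 := by
    apply List.filter_eq_self.mpr
    intro x hx
    rcases (PySem.List.mem_pyRange_one).1 hx with ⟨_, h⟩
    simpa using h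
  have e2 : (PySem.List.pyRange m b 1).filter (fun x => decide (x < m)) = [] := by
    apply List.filter_eq_nil_iff.mpr
    intro x hx
    rcases (PySem.List.mem_pyRange_one).1 hx with ⟨h, _⟩
    simpa using not_lt.mpr h
  rw [e1, e2, List.append_nil]

lemma pv_filter_not_lt (a m b : Int) (h1 : a ≤ m) (h2 : m ≤ b) :
    (PySem.List.pyRange a b 1).filter (fun x => !decide (x < m)) = PySem.List.pyRange m b 1 := by
  rw [PySem.List.pyRange_one_append a m b h1 h2, List.filter_append]
  have e1 : (PySem.List.pyRange a m 1).filter (fun x => !decide (x < m)) = [] := by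
    apply List.filter_eq_nil_iff.mpr
    intro x hx
    rcases (PySem.List.mem_pyRange_one).1 hx with ⟨_, h⟩
    simpa using h
  have e2 : (PySem.List.pyRange m b 1).filter (fun x => !decide (x < m)) = PySem.List.pyRange m b 1 := by
    apply List.filter_eq_self.mpr
    intro x hx
    rcases (PySem.List.mem_pyRange_one).1 hx with ⟨h, _⟩
    simpa using not_lt.mpr h
  rw [e1, e2, List.nil_append]

-- on each block, the modular test agrees with a plain comparison against the block's split point
lemma pv_mod_on_block (s r p : Int) (hpos : 0 < s + r) (n : Nat)
    (pos : Int) (hmem : pos ∈ PySem.List.pyRange (p + (n : Int) * (s + r)) (p + ((n : Int) + 1) * (s + r)) 1) :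
    PySem.Int.mod (pos - p) (s + r) = pos - p - (n : Int) * (s + r) := by
  rcases (PySem.List.mem_pyRange_one).1 hmem with ⟨hlo, hhi⟩
  have hfd : PySem.Int.floordiv (pos - p) (s + r) = (n : Int) :=
    (PySem.Int.floordiv_eq_iff_of_pos hpos).mpr ⟨by nlinarith, by nlinarith⟩
  have h := PySem.Int.floordiv_mul_add_mod (pos - p) (s + r)
  rw [hfd] at h
  omega

lemma pv_filter_cache (s r p : Int) (hs : 0 ≤ s) (hr : 0 ≤ r) (hpos : 0 < s + r) (n : Nat) :
    (PySem.List.pyRange p (p + (n : Int) * (s + r)) 1).filter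
        (fun pos => decide (PySem.Int.mod (pos - p) (s + r) < s))
      = pvBlocks p (s + r) s n := by
  induction n with
  | zero => simp [pvBlocks]
  | succ n ih =>
      have hle1 : p ≤ p + (n : Int) * (s + r) := by nlinarith
      have hle2 : p + (n : Int) * (s + r) ≤ p + ((n : Int) + 1) * (s + r) := by nlinarith
      push_cast
      rw [PySem.List.pyRange_one_append p (p + (n : Int) * (s + r)) (p + ((n : Int) + 1) * (s + r)) hle1 hle2,
        List.filter_append, ih]
      conv_rhs => rw [pvBlocks]
      congr 1
      have hcong : (PySem.List.pyRange (p + (n : Int) * (s + r)) (p + ((n : Int) + 1) * (s + r)) 1).filter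
            (fun pos => decide (PySem.Int.mod (pos - p) (s + r) < s))
          = (PySem.List.pyRange (p + (n : Int) * (s + r)) (p + ((n : Int) + 1) * (s + r)) 1).filter
            (fun pos => decide (pos < p + (n : Int) * (s + r) + s)) :=
        List.filter_congr (fun pos hmem => by
          rw [pv_mod_on_block s r p hpos n pos hmem]
          exact decide_eq_decide.mpr (by omega))
      rw [hcong, pv_filter_lt (p + (n : Int) * (s + r)) (p + (n : Int) * (s + r) + s)
        (p + ((n : Int) + 1) * (s + r)) (by omega) (by nlinarith)]

lemma pv_filter_sum (s r p : Int) (hs : 0 ≤ s) (hr : 0 ≤ r) (hpos : 0 < s + r) (n : Nat) :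
    (PySem.List.pyRange p (p + (n : Int) * (s + r)) 1).filter
        (fun pos => !decide (PySem.Int.mod (pos - p) (s + r) < s))
      = pvBlocks (p + s) (s + r) r n := by
  induction n with
  | zero => simp [pvBlocks]
  | succ n ih =>
      have hle1 : p ≤ p + (n : Int) * (s + r) := by nlinarith
      have hle2 : p + (n : Int) * (s + r) ≤ p + ((n : Int) + 1) * (s + r) := by nlinarith
      push_cast
      rw [PySem.List.pyRange_one_append p (p + (n : Int) * (s + r)) (p + ((n : Int) + 1) * (s + r)) hle1 hle2,
        List.filter_append, ih]
      conv_rhs => rw [pvBlocks]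
      congr 1
      have hcong : (PySem.List.pyRange (p + (n : Int) * (s + r)) (p + ((n : Int) + 1) * (s + r)) 1).filter
            (fun pos => !decide (PySem.Int.mod (pos - p) (s + r) < s))
          = (PySem.List.pyRange (p + (n : Int) * (s + r)) (p + ((n : Int) + 1) * (s + r)) 1).filter
            (fun pos => !decide (pos < p + (n : Int) * (s + r) + s)) :=
        List.filter_congr (fun pos hmem => by
          rw [pv_mod_on_block s r p hpos n pos hmem]
          exact congrArg (fun b => !b) (decide_eq_decide.mpr (by omega)))
      rw [hcong, pv_filter_not_lt (p + (n : Int) * (s + r)) (p + (n : Int) * (s + r) + s)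
        (p + ((n : Int) + 1) * (s + r)) (by omega) (by nlinarith)]
      congr 1 <;> ring

lemma pv_eq (b s p r : Int) (hb : 0 ≤ b) (hs : 0 ≤ s) (hr : 0 ≤ r) :
    create_position_ids b s p r = create_position_ids_alt b s p r := by
  obtain ⟨n, rfl⟩ : ∃ n : Nat, (n : Int) = b := ⟨b.toNat, Int.toNat_of_nonneg hb⟩
  rw [pvA_eq s p r n]
  simp only [create_position_ids_alt]
  rw [pv_foldl_partition]
  simp only [List.nil_append]
  rcases eq_or_lt_of_le (by omega : (0 : Int) ≤ s + r) with hz | hpos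
  · have hs0 : s = 0 := by omega
    have hr0 : r = 0 := by omega
    subst hs0; subst hr0
    have hbl : ∀ (c : Int) (m : Nat), pvBlocks c 0 0 m = [] := by
      intro c m
      induction m with
      | zero => rfl
      | succ k ih => simpa [pvBlocks, PySem.List.pyRange_one_eq_nil (le_refl _)] using ih
    simp [hbl]
  · rw [pv_filter_cache s r p hs hr hpos n, pv_filter_sum s r p hs hr hpos n]

lemma pv_foldl_id {α β : Type} (f : α → β → α) (hf : ∀ a x, f a x = a) :
    ∀ (l : List β) (a : α), l.foldl f a = a := by
  intro l
  induction l with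
  | nil => intro a; rfl
  | cons x xs ih => intro a; rw [List.foldl_cons, hf]; exact ih a

lemma pv_alt_empty (b s p r : Int) (h : b * (s + r) ≤ 0) :
    create_position_ids_alt b s p r = ([], []) := by
  simp only [create_position_ids_alt]
  rw [PySem.List.pyRange_one_eq_nil (by linarith)]
  rfl

lemma pv_a_empty_neg (b s p r : Int) (hb : b ≤ 0) :
    create_position_ids b s p r = ([], []) := by
  unfold create_position_ids
  rw [PySem.List.pyRange_one_eq_nil hb]
  rfl

lemma pv_a_empty_blocks (b s p r : Int) (hs : s ≤ 0) (hr : r ≤ 0) :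
    create_position_ids b s p r = ([], []) := by
  unfold create_position_ids
  exact pv_foldl_id _ (fun acc i => by
    simp only [PySem.List.pyRange_one_eq_nil (by linarith : p + i * (s + r) + s ≤ p + i * (s + r)),
      PySem.List.pyRange_one_eq_nil (by linarith : p + i * (s + r) + s + r ≤ p + i * (s + r) + s),
      List.append_nil]) _ _

-- ===== VERDICT (by name: the statement is the Claim_ definition above) =====
theorem create_position_ids_spec : Claim_equal_create_position_ids := by
  intro b s p r _ hpre
  unfold Spec_create_position_ids
  rcases lt_or_ge b 0 with hb | hb
  · rcases hpre with ⟨hs, hr⟩ | ⟨_, hsr⟩ | ⟨hb', _, _⟩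
    · rw [pv_a_empty_neg b s p r hb.le, pv_alt_empty b s p r (mul_nonpos_of_nonpos_of_nonneg hb.le (by omega))]
    · rw [pv_a_empty_neg b s p r hb.le, pv_alt_empty b s p r (mul_nonpos_of_nonpos_of_nonneg hb.le hsr)]
    · omega
  · rcases hpre with ⟨hs, hr⟩ | ⟨hb', hsr⟩ | ⟨_, hs, hr⟩
    · exact pv_eq b s p r hb hs hr
    · have hb0 : b = 0 := le_antisymm hb' hb
      subst hb0
      rw [pv_a_empty_neg 0 s p r le_rfl, pv_alt_empty 0 s p r (by simp)]
    · rw [pv_a_empty_blocks b s p r hs hr, pv_alt_empty b s p r (mul_nonpos_of_nonneg_of_nonpos hb (by omega))]
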